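-- pv_equiv track=rewrite | github.com/GY-feng/Notes | 课程-数据结构与算法/week2-递推/exercise.py | palindromes_string
-- ===== SOURCE A (Python) =====
-- def palindromes_string(str,l,r):#左边界和右边界
--     if l<r:
--         if str[l]==str[r] and str[r]==str[l]:
--             return palindromes_string(str,l+1,r-1)
--         else:
--             return False
--     else:
--         return True
--     pass
-- ===== SOURCE B (Python) =====
-- def palindromes_string(str, l, r):
--     # Closed-form trip count: A's recursion compares exactly ceil((r-l)/2)
--     # index pairs (l+i, r-i); do the same comparisons with a counted loop.
--     return all(str[l + i] == str[r - i] for i in range((r - l + 1) // 2))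
-- ===== Notes on version B (the rewrite author's own statement) =====
-- stated objective: alternative
-- what changed: Replaced the recursion on (l+1, r-1) by a single all() over a counted range with the closed-form trip count (r-l+1)//2.
import Mathlib
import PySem

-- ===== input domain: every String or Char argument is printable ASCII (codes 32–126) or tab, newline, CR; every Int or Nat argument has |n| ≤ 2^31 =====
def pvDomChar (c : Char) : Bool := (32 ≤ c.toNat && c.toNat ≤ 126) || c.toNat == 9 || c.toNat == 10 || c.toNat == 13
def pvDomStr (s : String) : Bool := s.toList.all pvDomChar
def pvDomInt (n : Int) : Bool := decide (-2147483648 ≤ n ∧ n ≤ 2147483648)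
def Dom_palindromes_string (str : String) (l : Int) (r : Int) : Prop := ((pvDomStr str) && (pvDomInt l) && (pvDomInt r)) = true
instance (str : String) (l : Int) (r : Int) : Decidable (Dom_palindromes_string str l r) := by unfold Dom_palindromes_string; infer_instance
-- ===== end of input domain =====

-- B replaces A's (l+1, r-1) recursion by one all() over a counted range with the
-- closed-form trip count (r-l+1)//2 (alternative decomposition; return value only).

-- ===== PORT A =====
def palindromes_string (str : String) (l : Int) (r : Int) : Bool :=
  if l < r then
    match PySem.Str.pyGet? str l, PySem.Str.pyGet? str r with
    | some cl, some cr =>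
        if cl == cr && cr == cl then palindromes_string str (l + 1) (r - 1)
        else false
    | _, _ => false          -- IndexError in Python; excluded by Pre_
  else true
termination_by (r - l).toNat
decreasing_by omega

-- ===== PORT B =====
def palindromes_string_alt (str : String) (l : Int) (r : Int) : Bool :=
  (PySem.List.pyRange 0 (PySem.Int.floordiv (r - l + 1) 2) 1).all
    (fun i => PySem.Str.pyGet? str (l + i) == PySem.Str.pyGet? str (r - i))

-- ===== PRECONDITION & SPEC =====
-- Pre_ excludes exactly the inputs on which A raises IndexError: l < r with
-- l or r outside Python's negative-wraparound range [-len, len).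
def Pre_palindromes_string (str : String) (l : Int) (r : Int) : Prop :=
  r ≤ l ∨ (-(str.toList.length : Int) ≤ l ∧ r < (str.toList.length : Int))
instance (str : String) (l : Int) (r : Int) : Decidable (Pre_palindromes_string str l r) := by
  unfold Pre_palindromes_string; infer_instance

def pvWitness_palindromes_string : String × Int × Int := ("abcba", 0, 4)

def Spec_palindromes_string (str : String) (l : Int) (r : Int) (out : Bool) : Prop := out = palindromes_string_alt str l r
instance (str : String) (l : Int) (r : Int) (out : Bool) : Decidable (Spec_palindromes_string str l r out) := by unfold Spec_palindromes_string; infer_instance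

-- ===== CLAIM (what is proved, stated in full; the proofs are below) =====
def Claim_equal_palindromes_string : Prop := ∀ (str : String) (l : Int) (r : Int), Dom_palindromes_string str l r → Pre_palindromes_string str l r → Spec_palindromes_string str l r (palindromes_string str l r)

-- ===== LEMMAS AND PROOFS =====

theorem pv_floordiv_add_two (a : Int) :
    PySem.Int.floordiv (a + 2) 2 = PySem.Int.floordiv a 2 + 1 := by
  have hq := (PySem.Int.floordiv_eq_iff_of_pos (a := a) (b := 2)
    (q := PySem.Int.floordiv a 2) (by omega)).mp rfl
  rw [PySem.Int.floordiv_eq_iff_of_pos (by omega)]; omega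

theorem pv_get_some (s : String) (i : Int) (h1 : -(s.toList.length : Int) ≤ i)
    (h2 : i < s.toList.length) : ∃ c, PySem.Str.pyGet? s i = some c := by
  have he : s.toList.length = s.length := String.length_toList
  cases h : PySem.Str.pyGet? s i with
  | some c => exact ⟨c, rfl⟩
  | none =>
    exfalso
    simp [PySem.List.pyGet?_eq_none_iff, PySem.Raise.InRange] at h
    omega

theorem pv_all_ext {α : Type} {xs : List α} {p q : α → Bool}
    (h : ∀ x ∈ xs, p x = q x) : xs.all p = xs.all q := by
  induction xs with
  | nil => rfl
  | cons x xs ih =>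
    simp only [List.all_cons, h x (by simp), ih (fun y hy => h y (by simp [hy]))]

theorem pv_alt_trivial (str : String) (l r : Int) (h : r ≤ l) :
    palindromes_string_alt str l r = true := by
  unfold palindromes_string_alt
  have hk : PySem.Int.floordiv (r - l + 1) 2 < 1 := by
    rw [PySem.Int.floordiv_lt_iff_lt_mul (by omega)]; omega
  rw [PySem.List.pyRange_one_eq_nil (by omega)]
  rfl

theorem pv_alt_step (str : String) (l r : Int) (hlr : l < r) (cl : Char)
    (hl : PySem.Str.pyGet? str l = some cl) (hr : PySem.Str.pyGet? str r = some cl) :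
    palindromes_string_alt str l r = palindromes_string_alt str (l + 1) (r - 1) := by
  unfold palindromes_string_alt
  have hk : 1 ≤ PySem.Int.floordiv (r - l + 1) 2 := by
    rw [PySem.Int.le_floordiv_iff_mul_le (by omega)]; omega
  have hk2 : PySem.Int.floordiv (r - 1 - (l + 1) + 1) 2 = PySem.Int.floordiv (r - l + 1) 2 - 1 := by
    have := pv_floordiv_add_two (r - l - 1)
    have he : r - l - 1 + 2 = r - l + 1 := by ring
    rw [he] at this
    have he2 : r - 1 - (l + 1) + 1 = r - l - 1 := by ring
    rw [he2]; omega
  rw [hk2]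
  rw [PySem.List.pyRange_one_cons (by omega)]
  simp only [List.all_cons, add_zero, sub_zero, hl, hr, BEq.rfl, Bool.true_and]
  rw [show (0:Int) + 1 = 1 by norm_num]
  rw [PySem.List.pyRange_one 1, PySem.List.pyRange_one 0]
  simp only [List.all_map, sub_zero]
  apply pv_all_ext
  intro j _
  simp only [Function.comp_apply]
  have e1 : l + (1 + (j : Int)) = l + 1 + (0 + (j : Int)) := by ring
  have e2 : r - (1 + (j : Int)) = r - 1 - (0 + (j : Int)) := by ring
  rw [e1, e2]

theorem pv_aux : ∀ (n : Nat) (str : String) (l r : Int), (r - l).toNat ≤ n →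
    Pre_palindromes_string str l r →
    palindromes_string str l r = palindromes_string_alt str l r := by
  intro n
  induction n with
  | zero =>
    intro str l r hn _
    have hle : r ≤ l := by omega
    rw [palindromes_string, if_neg (by omega), pv_alt_trivial str l r hle]
  | succ n ih =>
    intro str l r hn hpre
    by_cases hlr : l < r
    · have hb : -(str.toList.length : Int) ≤ l ∧ r < str.toList.length := by
        rcases hpre with h | h
        · omega
        · exact h
      obtain ⟨cl, hcl⟩ := pv_get_some str l hb.1 (by omega)
      obtain ⟨cr, hcr⟩ := pv_get_some str r (by omega) hb.2
      rw [palindromes_string, if_pos hlr]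
      simp only [hcl, hcr]
      by_cases hc : cl = cr
      · subst hc
        simp only [BEq.rfl, Bool.and_self, if_true]
        rw [ih str (l + 1) (r - 1) (by omega)
          (Or.inr ⟨by omega, by omega⟩)]
        exact (pv_alt_step str l r hlr cl hcl hcr).symm
      · have hbe : (cl == cr) = false := by simp [hc]
        simp only [hbe, Bool.false_and, Bool.false_eq_true, if_false]
        unfold palindromes_string_alt
        have hk : 1 ≤ PySem.Int.floordiv (r - l + 1) 2 := by
          rw [PySem.Int.le_floordiv_iff_mul_le (by omega)]; omega
        rw [PySem.List.pyRange_one_cons (by omega)]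
        have hne : (some cl == some cr) = false := by simp [hc]
        simp only [List.all_cons, add_zero, sub_zero, hcl, hcr, hne, Bool.false_and]
    · rw [palindromes_string, if_neg hlr, pv_alt_trivial str l r (by omega)]

theorem pv_main (str : String) (l r : Int) (hpre : Pre_palindromes_string str l r) :
    palindromes_string str l r = palindromes_string_alt str l r :=
  pv_aux (r - l).toNat str l r le_rfl hpre

-- ===== VERDICT (by name: the statement is the Claim_ definition above) =====
theorem palindromes_string_spec : Claim_equal_palindromes_string := by
  intro str l r _ hpre
  exact pv_main str l r hpre
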